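-- pv_equiv track=rewrite | github.com/pypi-data/pypi-mirror-335 | packages/funlog/funlog-0.2.0.tar.gz/funlog-0.2.0/src/funlog/log_calls.py | balance_quotes
-- ===== SOURCE A (Python) =====
-- def balance_quotes(s: str) -> str:
--     """
--     Ensure balanced single and double quotes in a string, adding any missing quotes.
--     This is valuable especially for log file syntax highlighting.
--     """
--     stack: list[str] = []
--     for char in s:
--         if char in ("'", '"'):
--             if stack and stack[-1] == char:
--                 stack.pop()
--             else:
--                 stack.append(char)
--
--     if stack:
--         for quote in stack:
--             s += quote
--
--     return s
-- ===== SOURCE B (Python) =====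
-- def balance_quotes(s: str) -> str:
--     # Collect the quote subsequence, then cancel adjacent equal quote pairs
--     # to a fixpoint; the residue is exactly the unmatched quotes, in order.
--     q = "".join(c for c in s if c in ("'", '"'))
--     while True:
--         r = q.replace("''", "").replace('""', "")
--         if r == q:
--             break
--         q = r
--     return s + q
-- ===== Notes on version B (the rewrite author's own statement) =====
-- stated objective: alternative
-- what changed: Replaces A's single left-to-right stack scan with a rewriting approach: extract the quote-only subsequence and cancel adjacent equal quote pairs via repeated str.replace until a fixpoint, then append the residue.
import Mathlib
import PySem

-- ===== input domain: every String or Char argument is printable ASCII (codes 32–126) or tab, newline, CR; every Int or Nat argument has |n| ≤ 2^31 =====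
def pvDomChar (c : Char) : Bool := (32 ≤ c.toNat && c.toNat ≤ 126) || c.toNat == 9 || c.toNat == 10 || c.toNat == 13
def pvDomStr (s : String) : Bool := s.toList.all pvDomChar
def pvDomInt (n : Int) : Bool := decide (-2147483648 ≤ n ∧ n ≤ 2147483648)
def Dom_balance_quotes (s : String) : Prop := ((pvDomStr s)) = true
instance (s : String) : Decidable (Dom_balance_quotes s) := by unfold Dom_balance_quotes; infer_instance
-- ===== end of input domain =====

-- B cancels adjacent equal quote pairs by repeated str.replace to a fixpoint;
-- same return value as A's stack scan (objective: alternative decomposition).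

-- ===== PORT A =====
-- one step of A's `for char in s` loop
def pvStepA (st : List Char) (c : Char) : List Char :=
  if c = '\'' ∨ c = '"' then
    if st ≠ [] ∧ st.getLast? = some c then st.dropLast else st ++ [c]
  else st

def balance_quotes (s : String) : String :=
  let stack := s.toList.foldl pvStepA []
  -- `for quote in stack: s += quote`
  String.mk (stack.foldl (fun t q => t ++ [q]) s.toList)

-- ===== PORT B =====
-- spec-level description of one `q.replace(cc, "")` pass (used to prove the
-- termination of the fixpoint loop below; proved equal to PySem's replace)
def pvRep (c : Char) : List Char → List Char
  | [] => []
  | [a] => [a]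
  | a :: b :: t => if a = c ∧ b = c then pvRep c t else a :: pvRep c (b :: t)
termination_by l => l.length

theorem pvRep_length_le (c : Char) (l : List Char) : (pvRep c l).length ≤ l.length := by
  fun_induction pvRep c l with
  | case1 => exact Nat.le_refl _
  | case2 => exact Nat.le_refl _
  | case3 a b t h ih => simp [h]; omega
  | case4 a b t _ ih => simp; simp at ih; omega

theorem pvRep_ne_lt (c : Char) (l : List Char) (h : pvRep c l ≠ l) :
    (pvRep c l).length < l.length := by
  fun_induction pvRep c l with
  | case1 => exact absurd rfl h
  | case2 => exact absurd rfl h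
  | case3 a b t hc ih =>
      have := pvRep_length_le c t; simp [hc]; omega
  | case4 a b t hc ih =>
      have h' : pvRep c (b :: t) ≠ b :: t := by
        intro he; apply h; simp [he]
      have := ih h'; simp; simp at this; omega

theorem pvReplace_go_nil (old new : List Char) (fuel : Nat) (acc : List Char) :
    PySem.Chars.replace.go old new fuel [] acc = acc.reverse := by
  cases fuel <;> simp [PySem.Chars.replace.go]

theorem pvReplace_go_acc (old new : List Char) (fuel : Nat) :
    ∀ (l acc : List Char),
      PySem.Chars.replace.go old new fuel l acc
        = acc.reverse ++ PySem.Chars.replace.go old new fuel l [] := by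
  induction fuel with
  | zero => intro l acc; simp [PySem.Chars.replace.go]
  | succ n ih =>
      intro l acc
      cases l with
      | nil => simp [pvReplace_go_nil]
      | cons a t =>
          simp only [PySem.Chars.replace.go]
          by_cases hp : old.isPrefixOf (a :: t) = true
          · simp only [if_pos hp]
            rw [ih _ (new.reverse ++ acc), ih _ (new.reverse ++ [])]
            simp
          · simp only [if_neg hp]
            rw [ih t (a :: acc), ih t [a]]
            simp

theorem pvReplace_go_pair (c : Char) (fuel : Nat) :
    ∀ (l : List Char), l.length ≤ fuel →
      PySem.Chars.replace.go [c, c] [] fuel l [] = pvRep c l := by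
  induction fuel with
  | zero =>
      intro l hl
      have : l = [] := by cases l <;> simp_all
      subst this; simp [pvReplace_go_nil, pvRep]
  | succ n ih =>
      intro l hl
      match l with
      | [] => simp [pvReplace_go_nil, pvRep]
      | [a] =>
          have hp : ([c, c].isPrefixOf [a]) = false := by
            simp [List.isPrefixOf]
          simp only [PySem.Chars.replace.go]
          rw [hp]
          simp only [Bool.false_eq_true, if_false]
          rw [pvReplace_go_nil]
          simp [pvRep]
      | a :: b :: t =>
          by_cases hc : a = c ∧ b = c
          · have hp : ([c, c].isPrefixOf (a :: b :: t)) = true := by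
              simp [List.isPrefixOf, hc.1, hc.2]
            simp only [PySem.Chars.replace.go]
            rw [hp]
            have ht : t.length ≤ n := by
              simp only [List.length_cons] at hl; omega
            simp only [if_true, List.length_cons, List.length_nil, List.drop_succ_cons,
              List.drop_zero, List.reverse_nil, List.nil_append]
            rw [ih t ht]
            simp [pvRep, hc.1, hc.2]
          · have hp : ([c, c].isPrefixOf (a :: b :: t)) = false := by
              simp [List.isPrefixOf]; tauto
            simp only [PySem.Chars.replace.go]
            rw [hp]
            simp only [Bool.false_eq_true, if_false]
            rw [pvReplace_go_acc]
            have hbt : (b :: t).length ≤ n := by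
              simp only [List.length_cons] at hl ⊢; omega
            rw [ih (b :: t) hbt]
            simp [pvRep, hc]

theorem pvReplace_pair_eq (c : Char) (l : List Char) :
    PySem.Chars.replace l [c, c] [] = pvRep c l := by
  simp only [PySem.Chars.replace, List.isEmpty_cons, Bool.false_eq_true, if_false]
  exact pvReplace_go_pair c l.length l (le_refl _)

-- one pass of B's loop body: q.replace("''","").replace('""',"")
def pvReduceStep (q : List Char) : List Char :=
  PySem.Chars.replace (PySem.Chars.replace q ['\'', '\''] []) ['"', '"'] []

theorem pvReduceStep_ne_lt (q : List Char) (h : pvReduceStep q ≠ q) :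
    (pvReduceStep q).length < q.length := by
  unfold pvReduceStep at *
  rw [pvReplace_pair_eq, pvReplace_pair_eq] at *
  by_cases h1 : pvRep '\'' q = q
  · rw [h1] at h ⊢; exact pvRep_ne_lt _ _ h
  · have := pvRep_ne_lt '\'' q h1
    have := pvRep_length_le '"' (pvRep '\'' q)
    omega

-- B's `while True` loop, run to the fixpoint
def pvReduceLoop (q : List Char) : List Char :=
  let r := pvReduceStep q
  if h : r = q then q else pvReduceLoop r
termination_by q.length
decreasing_by exact pvReduceStep_ne_lt q h

def balance_quotes_alt (s : String) : String :=
  let q := s.toList.filter (fun c => c = '\'' ∨ c = '"')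
  String.mk (s.toList ++ pvReduceLoop q)

-- ===== PRECONDITION & SPEC =====
def Spec_balance_quotes (s : String) (out : String) : Prop := out = balance_quotes_alt s
instance (s : String) (out : String) : Decidable (Spec_balance_quotes s out) := by unfold Spec_balance_quotes; infer_instance

-- ===== CLAIM (what is proved, stated in full; the proofs are below) =====
def Claim_equal_balance_quotes : Prop := ∀ (s : String), Dom_balance_quotes s → Spec_balance_quotes s (balance_quotes s)

-- ===== LEMMAS AND PROOFS =====

-- A's stack never holds two equal adjacent quotes
theorem pvStepA_chain (st : List Char) (c : Char)
    (h : List.IsChain (· ≠ ·) st) : List.IsChain (· ≠ ·) (pvStepA st c) := by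
  unfold pvStepA
  split
  · split
    · rename_i hcond
      have hne : st ≠ [] := hcond.1
      have hdec : st.dropLast ++ [st.getLast hne] = st := List.dropLast_append_getLast hne
      have := (List.isChain_append.mp (hdec ▸ h)).1
      exact this
    · rw [List.isChain_append]
      refine ⟨h, List.isChain_singleton _, ?_⟩
      intro x hx y hy
      rename_i hcond
      simp at hy; subst hy
      intro he
      exact hcond ⟨by rintro rfl; simp at hx, by rw [hx, he]⟩
  · exact h

-- processing the same quote twice is a no-op on a chain stack
theorem pvStepA_twice (st : List Char) (c : Char) (hq : c = '\'' ∨ c = '"')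
    (h : List.IsChain (· ≠ ·) st) : pvStepA (pvStepA st c) c = st := by
  by_cases hcond : st ≠ [] ∧ st.getLast? = some c
  · have hne : st ≠ [] := hcond.1
    have hlast : st.getLast hne = c := by
      have := List.getLast?_eq_some_getLast hne ▸ hcond.2
      exact Option.some.inj this
    have hdec : st.dropLast ++ [c] = st := by
      rw [← hlast]; exact List.dropLast_append_getLast hne
    have hch := List.isChain_append.mp (hdec ▸ h)
    have hnotc : ¬ (st.dropLast ≠ [] ∧ st.dropLast.getLast? = some c) := by
      rintro ⟨hne', hl'⟩
      have := hch.2.2 c (by rw [hl']; rfl) c (by rfl)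
      exact this rfl
    unfold pvStepA
    rw [if_pos hq, if_pos hcond, if_pos hq, if_neg hnotc]
    exact hdec
  · unfold pvStepA
    rw [if_pos hq, if_neg hcond, if_pos hq,
      if_pos ⟨by simp, by rw [List.getLast?_concat]⟩]
    exact List.dropLast_concat ..

-- one replace pass does not change what A's scan computes
theorem pvFoldA_rep (c : Char) (hq : c = '\'' ∨ c = '"') (l : List Char) :
    ∀ st, List.IsChain (· ≠ ·) st →
      List.foldl pvStepA st (pvRep c l) = List.foldl pvStepA st l := by
  fun_induction pvRep c l with
  | case1 => intro st _; rfl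
  | case2 => intro st _; rfl
  | case3 a b t hc ih =>
      intro st hst
      rw [ih st hst, List.foldl_cons, List.foldl_cons, hc.1, hc.2,
        pvStepA_twice st c hq hst]
  | case4 a b t hc ih =>
      intro st hst
      simp only [List.foldl_cons]
      exact ih (pvStepA st a) (pvStepA_chain st a hst)

-- a fixpoint of one replace pass has no adjacent equal pair of c's
theorem pvRep_fix_noPair (c : Char) (l : List Char) (h : pvRep c l = l) :
    ∀ u v : List Char, l ≠ u ++ c :: c :: v := by
  fun_induction pvRep c l with
  | case1 => intro u v he
             have := congrArg List.length he; simp at this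
  | case2 => intro u v he
             have := congrArg List.length he; simp at this; omega
  | case3 a b t hc ih =>
      exfalso
      have hle := pvRep_length_le c t
      have hlen := congrArg List.length h
      simp only [List.length_cons] at hlen
      omega
  | case4 a b t hc ih =>
      have htail : pvRep c (b :: t) = b :: t := by
        have := h; simp at this; exact this
      intro u v he
      cases u with
      | nil =>
          simp at he
          exact hc ⟨he.1, he.2.1⟩
      | cons x u' =>
          simp at he
          exact ih htail u' v he.2

-- quote-only, pair-free lists form a ≠-chain
theorem pvNoPair_chain : ∀ l : List Char,
    (∀ x ∈ l, x = '\'' ∨ x = '"') →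
    (∀ u v : List Char, l ≠ u ++ '\'' :: '\'' :: v) →
    (∀ u v : List Char, l ≠ u ++ '"' :: '"' :: v) →
    List.IsChain (· ≠ ·) l := by
  intro l
  induction l with
  | nil => intro _ _ _; exact List.isChain_nil
  | cons a t ih =>
      intro hq h1 h2
      cases t with
      | nil => exact List.isChain_singleton _
      | cons b t' =>
          rw [List.isChain_cons_cons]
          constructor
          · intro he
            subst he
            rcases hq a (by simp) with rfl | rfl
            · exact h1 [] t' rfl
            · exact h2 [] t' rfl
          · exact ih (fun x hx => hq x (by simp [hx]))
              (fun u v he => h1 (a :: u) v (by rw [List.cons_append, he]))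
              (fun u v he => h2 (a :: u) v (by rw [List.cons_append, he]))

-- A's scan pushes every quote of a chain list
theorem pvFoldA_chain_quotes : ∀ (q st : List Char),
    (∀ x ∈ q, x = '\'' ∨ x = '"') → List.IsChain (· ≠ ·) (st ++ q) →
    List.foldl pvStepA st q = st ++ q := by
  intro q
  induction q with
  | nil => intro st _ _; simp
  | cons a t ih =>
      intro st hq hch
      have ha := hq a (by simp)
      have hstep : pvStepA st a = st ++ [a] := by
        unfold pvStepA
        rw [if_pos ha, if_neg ?_]
        rintro ⟨hne, hl⟩
        have hch2 := (List.isChain_append.mp hch).2.2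
        exact hch2 a (by rw [hl]; rfl) a rfl rfl
      simp only [List.foldl_cons, hstep]
      rw [ih (st ++ [a]) (fun x hx => hq x (by simp [hx])) (by simpa using hch)]
      simp

theorem pvRep_sublist (c : Char) (l : List Char) : (pvRep c l).Sublist l := by
  fun_induction pvRep c l with
  | case1 => exact List.Sublist.refl _
  | case2 => exact List.Sublist.refl _
  | case3 a b t hc ih =>
      exact ih.trans ((List.sublist_cons_self _ _).trans (List.sublist_cons_self _ _))
  | case4 a b t hc ih =>
      exact ih.cons₂ a

theorem pvReduceStep_sublist (q : List Char) : (pvReduceStep q).Sublist q := by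
  unfold pvReduceStep
  rw [pvReplace_pair_eq, pvReplace_pair_eq]
  exact (pvRep_sublist _ _).trans (pvRep_sublist _ _)

theorem pvReduceLoop_sublist (q : List Char) : (pvReduceLoop q).Sublist q := by
  fun_induction pvReduceLoop q with
  | case1 q r h => exact List.Sublist.refl _
  | case2 q r h ih => exact ih.trans (pvReduceStep_sublist q)

theorem pvReduceLoop_fix (q : List Char) :
    pvReduceStep (pvReduceLoop q) = pvReduceLoop q := by
  fun_induction pvReduceLoop q with
  | case1 q r h => exact h
  | case2 q r h ih => exact ih

theorem pvReduceLoop_foldA (q : List Char) : ∀ st, List.IsChain (· ≠ ·) st →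
    List.foldl pvStepA st (pvReduceLoop q) = List.foldl pvStepA st q := by
  fun_induction pvReduceLoop q with
  | case1 q r h => intro st _; rfl
  | case2 q r h ih =>
      intro st hst
      rw [ih st hst]
      show List.foldl pvStepA st (pvReduceStep q) = List.foldl pvStepA st q
      unfold pvReduceStep
      rw [pvReplace_pair_eq, pvReplace_pair_eq]
      rw [pvFoldA_rep '"' (Or.inr rfl) _ st hst]
      exact pvFoldA_rep '\'' (Or.inl rfl) _ st hst

-- a fixpoint of the combined pass is a fixpoint of each replace
theorem pvFix_both (r : List Char) (h : pvReduceStep r = r) :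
    pvRep '\'' r = r ∧ pvRep '"' r = r := by
  have h' : pvRep '"' (pvRep '\'' r) = r := by
    have := h; unfold pvReduceStep at this
    rw [pvReplace_pair_eq, pvReplace_pair_eq] at this
    exact this
  by_cases h1 : pvRep '\'' r = r
  · exact ⟨h1, by rw [h1] at h'; exact h'⟩
  · exfalso
    have hl1 := pvRep_ne_lt '\'' r h1
    have hl2 := pvRep_length_le '"' (pvRep '\'' r)
    have : r.length = (pvRep '"' (pvRep '\'' r)).length := by rw [h']
    omega

theorem pvFoldA_filter : ∀ (l : List Char) (st : List Char),
    List.foldl pvStepA st l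
      = List.foldl pvStepA st (l.filter (fun c => c = '\'' ∨ c = '"')) := by
  intro l
  induction l with
  | nil => intro st; rfl
  | cons a t ih =>
      intro st
      by_cases ha : a = '\'' ∨ a = '"'
      · simp only [List.filter_cons]
        rw [if_pos (by simpa using ha)]
        simp only [List.foldl_cons]
        exact ih _
      · simp only [List.filter_cons]
        rw [if_neg (by simpa using ha)]
        simp only [List.foldl_cons]
        have : pvStepA st a = st := by unfold pvStepA; rw [if_neg ha]
        rw [this]
        exact ih _

-- the central identity, on the list level
theorem pvMain (sl : List Char) :
    List.foldl pvStepA [] sl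
      = pvReduceLoop (sl.filter (fun c => c = '\'' ∨ c = '"')) := by
  set q := sl.filter (fun c => c = '\'' ∨ c = '"') with hqdef
  have hfilter : List.foldl pvStepA [] sl = List.foldl pvStepA [] q :=
    pvFoldA_filter sl []
  set r := pvReduceLoop q with hrdef
  have hq : ∀ x ∈ q, x = '\'' ∨ x = '"' := by
    intro x hx
    have := List.of_mem_filter hx
    simpa using this
  have hr : ∀ x ∈ r, x = '\'' ∨ x = '"' :=
    fun x hx => hq x ((pvReduceLoop_sublist q).mem hx)
  obtain ⟨hf1, hf2⟩ := pvFix_both r (pvReduceLoop_fix q)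
  have hchain : List.IsChain (· ≠ ·) r :=
    pvNoPair_chain r hr (pvRep_fix_noPair _ _ hf1) (pvRep_fix_noPair _ _ hf2)
  calc List.foldl pvStepA [] sl
      = List.foldl pvStepA [] q := hfilter
    _ = List.foldl pvStepA [] r := (pvReduceLoop_foldA q [] List.isChain_nil).symm
    _ = [] ++ r := pvFoldA_chain_quotes r [] hr (by simpa using hchain)
    _ = r := by simp

-- ===== VERDICT (by name: the statement is the Claim_ definition above) =====
theorem balance_quotes_spec : Claim_equal_balance_quotes := by
  intro s _
  show balance_quotes s = balance_quotes_alt s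
  show String.mk (List.foldl (fun t q => t ++ [q]) s.toList (List.foldl pvStepA [] s.toList))
      = String.mk (s.toList ++ pvReduceLoop
          (s.toList.filter (fun c => c = '\'' ∨ c = '"')))
  rw [PySem.List.foldl_append_singleton_eq_self, pvMain s.toList]
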